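-- pv_equiv track=rewrite | github.com/ljdyer/wer-calculator | app/levenshtein/make_levenshtein_html.py | generate_levenshtein_html
-- ===== SOURCE A (Python) =====
-- def create_matrix(m,n):
--     """Create an m by n matrix"""
--
--     return [[0 for _ in range(m)] for _ in range(n)]
--
-- def generate_levenshtein_html(matrix: list, backpointer_matrix: list,
--                              words_ref: list, words_hyp: list):
--     """Generate an HTML string to display a Levenshtein matrix with
--     backpointer symbols"""
--
--     new_matrix = create_matrix(len(matrix[0]), len(matrix))
--     words_ref = [''] + words_ref    # Header row
--     words_hyp = ['', ''] + words_hyp    # Header column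
--
--     # Combine numbers and backpointers
--     for i in range(len(matrix)):
--         for j in range(len(matrix[0])):
--             if backpointer_matrix[i][j]:
--                 new_matrix[i][j] = str(matrix[i][j]) + ' ' + \
--                             str(backpointer_matrix[i][j])
--     # Append header row
--     new_matrix = [words_ref] + new_matrix
--     # Append header column
--     new_matrix = [[words_hyp[i]] + new_matrix[i]
--                for i in range(len(new_matrix))]
--
--     html_lines = ['<table class="levenshtein"']
--     for row in new_matrix:
--         html_lines.append("<tr>")
--         for cell in row:
--             html_lines.append(f'<td>{cell}</td>')
--         html_lines.append("</tr>")
--     html_lines.append("</table>")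
--
--     return '\n'.join(html_lines)
-- ===== SOURCE B (Python) =====
-- def generate_levenshtein_html(matrix, backpointer_matrix, words_ref, words_hyp):
--     """Emit the HTML table in a single pass over the matrix rows."""
--     lines = ['<table class="levenshtein"', '<tr>']
--     for w in ['', ''] + words_ref:
--         lines.append(f'<td>{w}</td>')
--     lines.append('</tr>')
--     for i, row in enumerate(matrix):
--         lines.append('<tr>')
--         lines.append(f'<td>{words_hyp[i - 1] if i else ""}</td>')
--         for j in range(len(matrix[0])):
--             bp = backpointer_matrix[i][j]
--             cell = f'{row[j]} {bp}' if bp else str(row[j])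
--             lines.append(f'<td>{cell}</td>')
--         lines.append('</tr>')
--     lines.append('</table>')
--     return '\n'.join(lines)
-- ===== Notes on version B (the rewrite author's own statement) =====
-- stated objective: simpler
-- what changed: B drops A's three-stage construction (preallocated cell matrix mutated in a double loop, then header row and header column prepended, then rendered) and emits the HTML lines in a single pass; Pre_ additionally requires every matrix row to cover the first row's width, because on ragged matrices A silently renders a preallocated 0 for a missing value (at empty-backpointer cells) while B indexes the row and raises.
-- intended difference: On inputs where some cell has an empty backpointer but a nonzero matrix value, A renders the leftover preallocated 0 instead of the distance, while B renders the actual matrix value, which is what a table displaying the Levenshtein matrix should show. — e.g. on generate_levenshtein_html([[1]], [[""]], [], []): A returns "<table class=\"levenshtein\"\n<tr>\n<td></td>\n<td></td>\n</tr>\n<tr>\n<td></td>\n<td>0</td>\n</tr>\n</table>", B returns "<table class=\"levenshtein\"\n<tr>\n<td></td>\n<td></td>\n</tr>\n<tr>\n<td></td>\n<td>1</td>\n</tr>\n</table>"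
import Mathlib
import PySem

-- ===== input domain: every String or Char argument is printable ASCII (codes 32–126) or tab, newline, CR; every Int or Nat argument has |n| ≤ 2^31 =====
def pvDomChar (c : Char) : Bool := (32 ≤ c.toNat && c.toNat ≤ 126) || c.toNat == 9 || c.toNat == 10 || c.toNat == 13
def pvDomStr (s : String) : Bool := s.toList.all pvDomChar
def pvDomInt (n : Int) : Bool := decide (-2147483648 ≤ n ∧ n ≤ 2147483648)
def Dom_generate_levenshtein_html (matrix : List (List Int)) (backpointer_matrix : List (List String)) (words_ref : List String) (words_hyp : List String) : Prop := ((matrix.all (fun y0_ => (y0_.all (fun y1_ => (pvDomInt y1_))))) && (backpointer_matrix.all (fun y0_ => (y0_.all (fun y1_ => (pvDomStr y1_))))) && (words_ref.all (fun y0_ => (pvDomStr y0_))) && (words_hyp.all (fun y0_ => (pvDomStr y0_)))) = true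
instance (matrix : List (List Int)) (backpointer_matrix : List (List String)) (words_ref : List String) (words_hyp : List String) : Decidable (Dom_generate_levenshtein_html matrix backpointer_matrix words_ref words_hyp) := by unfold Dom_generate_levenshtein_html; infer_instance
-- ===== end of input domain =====

-- B builds the HTML lines in one pass over the matrix, instead of A's three-stage
-- construction of an augmented cell matrix rendered afterwards (objective: simpler);
-- at empty-backpointer cells B shows the matrix value where A shows a leftover 0 (see D_).

-- ===== PORT A =====
-- Python's new_matrix holds ints (the initial 0s) and strings (the combined cells);
-- LevCell is that int-or-string cell type, levRender is what the f-string does to a cell.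
inductive LevCell
  | int : Int → LevCell
  | str : String → LevCell
deriving DecidableEq, Repr

def levRender : LevCell → String
  | .int n => PySem.Int.toStr n
  | .str t => t

def create_matrix (m n : Nat) : List (List LevCell) :=
  (List.range n).map (fun _ => (List.range m).map (fun _ => LevCell.int 0))

def generate_levenshtein_html (matrix : List (List Int)) (backpointer_matrix : List (List String)) (words_ref : List String) (words_hyp : List String) : String :=
  let m := (matrix.headD []).length
  let new_matrix0 := create_matrix m matrix.length
  let words_ref' := [""] ++ words_ref
  let words_hyp' := ["", ""] ++ words_hyp
  -- the double for-loop assigning new_matrix[i][j] (indexing via getD; Pre_ keeps it in range)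
  let nm := (List.range matrix.length).foldl (fun acc i =>
      (List.range m).foldl (fun acc j =>
        if ((backpointer_matrix.getD i []).getD j "") ≠ "" then
          acc.set i ((acc.getD i []).set j (LevCell.str
            (PySem.Int.toStr ((matrix.getD i []).getD j 0) ++ " " ++
              ((backpointer_matrix.getD i []).getD j ""))))
        else acc) acc) new_matrix0
  let nm1 := words_ref'.map LevCell.str :: nm
  let nm2 := (List.range nm1.length).map (fun i => LevCell.str (words_hyp'.getD i "") :: nm1.getD i [])
  let html_lines := nm2.foldl (fun acc row =>
      (row.foldl (fun acc cell => acc ++ ["<td>" ++ levRender cell ++ "</td>"]) (acc ++ ["<tr>"]))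
        ++ ["</tr>"])
      ["<table class=\"levenshtein\""]
  PySem.Str.join "\n" (html_lines ++ ["</table>"])

-- ===== PORT B =====
-- Source B's body loop 'for i, row in enumerate(matrix)' as structural recursion carrying i
def levBodyRows (backpointer_matrix : List (List String)) (words_hyp : List String) (n : Nat) : Nat → List (List Int) → List String
  | _, [] => []
  | i, row :: rest =>
    (["<tr>", "<td>" ++ (if 1 ≤ i then words_hyp.getD (i - 1) "" else "") ++ "</td>"]
      ++ (List.range n).map (fun j =>
            if ((backpointer_matrix.getD i []).getD j "") ≠ "" then
              "<td>" ++ PySem.Int.toStr (row.getD j 0) ++ " " ++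
                ((backpointer_matrix.getD i []).getD j "") ++ "</td>"
            else "<td>" ++ PySem.Int.toStr (row.getD j 0) ++ "</td>")
      ++ ["</tr>"])
    ++ levBodyRows backpointer_matrix words_hyp n (i + 1) rest

def generate_levenshtein_html_alt (matrix : List (List Int)) (backpointer_matrix : List (List String)) (words_ref : List String) (words_hyp : List String) : String :=
  let n := (matrix.headD []).length
  PySem.Str.join "\n"
    ((["<table class=\"levenshtein\"", "<tr>"]
        ++ ("" :: "" :: words_ref).map (fun w => "<td>" ++ w ++ "</td>") ++ ["</tr>"])
      ++ levBodyRows backpointer_matrix words_hyp n 0 matrix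
      ++ ["</table>"])

-- ===== PRECONDITION & SPEC =====
-- Pre_ is the set of inputs on which BOTH Pythons return: matrix nonempty, enough
-- header-column words, and — when rows are nonempty — backpointer rows covering
-- matrix[0]'s width and every matrix row at least that wide.  The last conjunct is
-- slightly narrower than A's return set: on ragged matrices A happens to return
-- (rendering a preallocated 0 where a row has no value, at empty-backpointer cells)
-- while B indexes the row and raises IndexError; those inputs are excluded.
def Pre_generate_levenshtein_html (matrix : List (List Int)) (backpointer_matrix : List (List String)) (words_ref : List String) (words_hyp : List String) : Prop :=
  matrix ≠ [] ∧
  matrix.length ≤ words_hyp.length + 1 ∧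
  (1 ≤ (matrix.headD []).length →
    matrix.length ≤ backpointer_matrix.length ∧
    (∀ i < matrix.length, (matrix.headD []).length ≤ (backpointer_matrix.getD i []).length) ∧
    (∀ i < matrix.length, (matrix.headD []).length ≤ (matrix.getD i []).length))
instance (matrix : List (List Int)) (backpointer_matrix : List (List String)) (words_ref : List String) (words_hyp : List String) : Decidable (Pre_generate_levenshtein_html matrix backpointer_matrix words_ref words_hyp) := by unfold Pre_generate_levenshtein_html; infer_instance

def pvWitness_generate_levenshtein_html : List (List Int) × List (List String) × List String × List String :=
  ([[1, 0], [2, 3]], [["", "d"], ["s", ""]], ["a"], ["b"])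

-- On inputs where some cell has an empty backpointer but a nonzero matrix value, A renders
-- the leftover preallocated 0 instead of the distance, while B renders the actual matrix
-- value, which is what a table displaying the Levenshtein matrix should show.
def D_generate_levenshtein_html (matrix : List (List Int)) (backpointer_matrix : List (List String)) (words_ref : List String) (words_hyp : List String) : Prop :=
  (matrix.zip backpointer_matrix).any (fun rowpair =>
    ((rowpair.1.zip rowpair.2).take (matrix.headD []).length).any
      (fun cell => cell.2 == "" && !(cell.1 == 0))) = true
instance (matrix : List (List Int)) (backpointer_matrix : List (List String)) (words_ref : List String) (words_hyp : List String) : Decidable (D_generate_levenshtein_html matrix backpointer_matrix words_ref words_hyp) := by unfold D_generate_levenshtein_html; infer_instance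

def Spec_generate_levenshtein_html (matrix : List (List Int)) (backpointer_matrix : List (List String)) (words_ref : List String) (words_hyp : List String) (out : String) : Prop := ¬ D_generate_levenshtein_html matrix backpointer_matrix words_ref words_hyp → out = generate_levenshtein_html_alt matrix backpointer_matrix words_ref words_hyp
instance (matrix : List (List Int)) (backpointer_matrix : List (List String)) (words_ref : List String) (words_hyp : List String) (out : String) : Decidable (Spec_generate_levenshtein_html matrix backpointer_matrix words_ref words_hyp out) := by unfold Spec_generate_levenshtein_html; infer_instance

def pvDiffWitness_generate_levenshtein_html : List (List Int) × List (List String) × List String × List String :=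
  ([[1]], [[""]], [], [])
def pvDiffWitnessOut_generate_levenshtein_html : String × String :=
  ("<table class=\"levenshtein\"\n<tr>\n<td></td>\n<td></td>\n</tr>\n<tr>\n<td></td>\n<td>0</td>\n</tr>\n</table>",
   "<table class=\"levenshtein\"\n<tr>\n<td></td>\n<td></td>\n</tr>\n<tr>\n<td></td>\n<td>1</td>\n</tr>\n</table>")

-- ===== CLAIM (what is proved, stated in full; the proofs are below) =====
def Claim_unchanged_generate_levenshtein_html : Prop := ∀ (matrix : List (List Int)) (backpointer_matrix : List (List String)) (words_ref : List String) (words_hyp : List String), Dom_generate_levenshtein_html matrix backpointer_matrix words_ref words_hyp → Pre_generate_levenshtein_html matrix backpointer_matrix words_ref words_hyp → Spec_generate_levenshtein_html matrix backpointer_matrix words_ref words_hyp (generate_levenshtein_html matrix backpointer_matrix words_ref words_hyp)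
def Claim_changed_generate_levenshtein_html : Prop := Dom_generate_levenshtein_html (pvDiffWitness_generate_levenshtein_html.1) (pvDiffWitness_generate_levenshtein_html.2.1) (pvDiffWitness_generate_levenshtein_html.2.2.1) (pvDiffWitness_generate_levenshtein_html.2.2.2) ∧ Pre_generate_levenshtein_html (pvDiffWitness_generate_levenshtein_html.1) (pvDiffWitness_generate_levenshtein_html.2.1) (pvDiffWitness_generate_levenshtein_html.2.2.1) (pvDiffWitness_generate_levenshtein_html.2.2.2) ∧ D_generate_levenshtein_html (pvDiffWitness_generate_levenshtein_html.1) (pvDiffWitness_generate_levenshtein_html.2.1) (pvDiffWitness_generate_levenshtein_html.2.2.1) (pvDiffWitness_generate_levenshtein_html.2.2.2) ∧ generate_levenshtein_html (pvDiffWitness_generate_levenshtein_html.1) (pvDiffWitness_generate_levenshtein_html.2.1) (pvDiffWitness_generate_levenshtein_html.2.2.1) (pvDiffWitness_generate_levenshtein_html.2.2.2) = pvDiffWitnessOut_generate_levenshtein_html.1 ∧ generate_levenshtein_html_alt (pvDiffWitness_generate_levenshtein_html.1) (pvDiffWitness_generate_levenshtein_html.2.1) (pvDiffWitness_generate_levenshtein_html.2.2.1)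 (pvDiffWitness_generate_levenshtein_html.2.2.2) = pvDiffWitnessOut_generate_levenshtein_html.2 ∧ pvDiffWitnessOut_generate_levenshtein_html.1 ≠ pvDiffWitnessOut_generate_levenshtein_html.2

def Claim_exact_generate_levenshtein_html : Prop := ∀ (matrix : List (List Int)) (backpointer_matrix : List (List String)) (words_ref : List String) (words_hyp : List String), Dom_generate_levenshtein_html matrix backpointer_matrix words_ref words_hyp → Pre_generate_levenshtein_html matrix backpointer_matrix words_ref words_hyp → D_generate_levenshtein_html matrix backpointer_matrix words_ref words_hyp → generate_levenshtein_html matrix backpointer_matrix words_ref words_hyp ≠ generate_levenshtein_html_alt matrix backpointer_matrix words_ref words_hyp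

-- ===== LEMMAS AND PROOFS =====

-- the inner j-loop only rewrites row i of acc
theorem lev_inner_comm (c : Nat → Prop) [DecidablePred c] (g : Nat → LevCell)
    (l : List Nat) :
    ∀ (acc : List (List LevCell)) (i : Nat), i < acc.length →
    l.foldl (fun acc j => if c j then acc.set i ((acc.getD i []).set j (g j)) else acc) acc
      = acc.set i (l.foldl (fun r j => if c j then r.set j (g j) else r) (acc.getD i [])) := by
  induction l with
  | nil =>
      intro acc i hi
      simp only [List.foldl_nil]
      rw [List.getD_eq_getElem _ _ hi, List.set_getElem_self]
  | cons a l ih =>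
      intro acc i hi
      by_cases h : c a
      · simp only [List.foldl_cons, if_pos h]
        rw [ih _ i (by simp [hi])]
        rw [List.set_set]
        congr 1
        congr 1
        rw [List.getD_eq_getElem _ _ (by simp [hi]), List.getElem_set_self,
            List.getD_eq_getElem _ _ hi]
      · simp only [List.foldl_cons, if_neg h]
        exact ih acc i hi

theorem lev_rowFold_length (c : Nat → Prop) [DecidablePred c] (g : Nat → LevCell)
    (l : List Nat) : ∀ (r : List LevCell),
    (l.foldl (fun r j => if c j then r.set j (g j) else r) r).length = r.length := by
  induction l with
  | nil => intro r; rfl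
  | cons a l ih =>
      intro r
      by_cases h : c a
      · simp only [List.foldl_cons, if_pos h]; rw [ih]; simp
      · simp only [List.foldl_cons, if_neg h]; exact ih r

theorem lev_rowFold_getD (c : Nat → Prop) [DecidablePred c] (g : Nat → LevCell)
    (d : LevCell) (l : List Nat) :
    ∀ (r : List LevCell), (∀ x ∈ l, x < r.length) → ∀ j,
    (l.foldl (fun r j => if c j then r.set j (g j) else r) r).getD j d
      = if j ∈ l ∧ c j then g j else r.getD j d := by
  induction l with
  | nil => intro r _ j; simp
  | cons a l ih =>
      intro r hl j
      have ha : a < r.length := hl a (by simp)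
      by_cases hca : c a
      · simp only [List.foldl_cons, if_pos hca]
        rw [ih _ (by intro x hx; simpa using hl x (List.mem_cons_of_mem a hx)) j]
        by_cases hjl : j ∈ l ∧ c j
        · rw [if_pos hjl, if_pos ⟨List.mem_cons_of_mem a hjl.1, hjl.2⟩]
        · rw [if_neg hjl]
          by_cases hja : j = a
          · subst hja
            rw [if_pos ⟨List.mem_cons_self, hca⟩]
            rw [List.getD_eq_getElem _ _ (by simpa using ha), List.getElem_set_self]
          · have hnc : ¬(j ∈ a :: l ∧ c j) := by
              rintro ⟨hm, hc⟩
              exact (List.mem_cons.1 hm).elim (fun h => hja h) (fun h => hjl ⟨h, hc⟩)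
            rw [if_neg hnc]
            by_cases hjr : j < r.length
            · rw [List.getD_eq_getElem _ _ (by simpa using hjr),
                  List.getD_eq_getElem _ _ hjr]
              exact List.getElem_set_ne (Ne.symm hja) _
            · rw [List.getD_eq_default _ _ (by simpa using hjr),
                  List.getD_eq_default _ _ (by omega)]
      · simp only [List.foldl_cons, if_neg hca]
        rw [ih _ (fun x hx => hl x (List.mem_cons_of_mem a hx)) j]
        by_cases hjl : j ∈ l ∧ c j
        · rw [if_pos hjl, if_pos ⟨List.mem_cons_of_mem a hjl.1, hjl.2⟩]
        · have hnc : ¬(j ∈ a :: l ∧ c j) := by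
            rintro ⟨hm, hc⟩
            exact (List.mem_cons.1 hm).elim (fun h => hca (h ▸ hc)) (fun h => hjl ⟨h, hc⟩)
          rw [if_neg hjl, if_neg hnc]

theorem lev_inner_length (c : Nat → Prop) [DecidablePred c] (g : Nat → LevCell)
    (i : Nat) (l : List Nat) : ∀ (acc : List (List LevCell)),
    (l.foldl (fun acc j => if c j then acc.set i ((acc.getD i []).set j (g j)) else acc) acc).length
      = acc.length := by
  induction l with
  | nil => intro acc; rfl
  | cons a l ih =>
      intro acc
      by_cases h : c a
      · simp only [List.foldl_cons, if_pos h]; rw [ih]; simp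
      · simp only [List.foldl_cons, if_neg h]; exact ih acc

theorem lev_outer_length (c : Nat → Nat → Prop) [∀ i, DecidablePred (c i)]
    (g : Nat → Nat → LevCell) (m : Nat) (l : List Nat) :
    ∀ (acc : List (List LevCell)),
    (l.foldl (fun acc i => (List.range m).foldl
        (fun acc j => if c i j then acc.set i ((acc.getD i []).set j (g i j)) else acc) acc)
      acc).length = acc.length := by
  induction l with
  | nil => intro acc; rfl
  | cons a l ih =>
      intro acc
      simp only [List.foldl_cons]
      rw [ih, lev_inner_length]

theorem lev_outer_getD (c : Nat → Nat → Prop) [∀ i, DecidablePred (c i)]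
    (g : Nat → Nat → LevCell) (m : Nat) (l : List Nat) :
    ∀ (acc : List (List LevCell)), l.Nodup → (∀ x ∈ l, x < acc.length) → ∀ i,
    (l.foldl (fun acc i => (List.range m).foldl
        (fun acc j => if c i j then acc.set i ((acc.getD i []).set j (g i j)) else acc) acc)
      acc).getD i []
      = if i ∈ l then
          (List.range m).foldl (fun r j => if c i j then r.set j (g i j) else r) (acc.getD i [])
        else acc.getD i [] := by
  induction l with
  | nil => intro acc _ _ i; simp
  | cons a l ih =>
      intro acc hnd hb i
      have ha : a < acc.length := hb a (by simp)
      simp only [List.foldl_cons]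
      rw [lev_inner_comm _ _ _ acc a ha]
      rw [ih _ (List.nodup_cons.1 hnd).2 (by intro x hx; simpa using hb x (List.mem_cons_of_mem a hx)) i]
      by_cases hil : i ∈ l
      · rw [if_pos hil, if_pos (List.mem_cons_of_mem a hil)]
        have hia : i ≠ a := fun h => (List.nodup_cons.1 hnd).1 (h ▸ hil)
        congr 1
        by_cases hir : i < acc.length
        · rw [List.getD_eq_getElem _ _ (by simpa using hir), List.getD_eq_getElem _ _ hir]
          exact List.getElem_set_ne (Ne.symm hia) _
        · rw [List.getD_eq_default _ _ (by simpa using hir), List.getD_eq_default _ _ (by omega)]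
      · rw [if_neg hil]
        by_cases hia : i = a
        · subst hia
          rw [if_pos List.mem_cons_self,
              List.getD_eq_getElem _ _ (by simpa using ha), List.getElem_set_self]
        · have hnc : i ∉ a :: l := by
            intro h
            exact (List.mem_cons.1 h).elim (fun h => hia h) (fun h => hil h)
          rw [if_neg hnc]
          by_cases hir : i < acc.length
          · rw [List.getD_eq_getElem _ _ (by simpa using hir), List.getD_eq_getElem _ _ hir]
            exact List.getElem_set_ne (fun h => hia h.symm) _
          · rw [List.getD_eq_default _ _ (by simpa using hir), List.getD_eq_default _ _ (by omega)]

-- a list of length m whose entries are pointwise f is (range m).map f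
theorem lev_list_eq_range_map (m : Nat) (f : Nat → LevCell) (r : List LevCell)
    (hlen : r.length = m) (h : ∀ j, j < m → r.getD j (LevCell.int 0) = f j) :
    r = (List.range m).map f := by
  apply List.ext_getElem (by simpa using hlen)
  intro j h1 h2
  have := h j (by omega)
  rw [List.getD_eq_getElem _ _ h1] at this
  simpa using this

-- A's rendering loop flattens to a flatMap over the rows
theorem lev_lines_flat (rows : List (List LevCell)) :
    ∀ acc, rows.foldl (fun acc row =>
      (row.foldl (fun acc cell => acc ++ ["<td>" ++ levRender cell ++ "</td>"]) (acc ++ ["<tr>"]))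
        ++ ["</tr>"]) acc
      = acc ++ rows.flatMap (fun row =>
          "<tr>" :: (row.map (fun cell => "<td>" ++ levRender cell ++ "</td>") ++ ["</tr>"])) := by
  induction rows with
  | nil => intro acc; simp
  | cons row rows ih =>
      intro acc
      simp only [List.foldl_cons, List.flatMap_cons]
      rw [PySem.List.foldl_append_singleton_eq_map, ih]
      simp

theorem lev_hyp_getD (wh : List String) (i : Nat) :
    (["", ""] ++ wh).getD (i + 1) "" = if 1 ≤ i then wh.getD (i - 1) "" else "" := by
  cases i with
  | zero => simp
  | succ k => simp

-- B's body recursion, read off against the row index list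
theorem lev_body_eq (bp : List (List String)) (wh : List String) (n : Nat)
    (matrix : List (List Int)) :
    ∀ (ms : List (List Int)) (k : Nat), ms = matrix.drop k →
    levBodyRows bp wh n k ms
      = (List.range' k ms.length).flatMap (fun i =>
          "<tr>" :: ("<td>" ++ (if 1 ≤ i then wh.getD (i - 1) "" else "") ++ "</td>")
            :: ((List.range n).map (fun j =>
                  if ((bp.getD i []).getD j "") ≠ "" then
                    "<td>" ++ PySem.Int.toStr ((matrix.getD i []).getD j 0) ++ " " ++
                      ((bp.getD i []).getD j "") ++ "</td>"
                  else "<td>" ++ PySem.Int.toStr ((matrix.getD i []).getD j 0) ++ "</td>") ++ ["</tr>"])) := by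
  intro ms
  induction ms with
  | nil => intro k _; simp [levBodyRows]
  | cons row rest ih =>
      intro k hk
      have hrow : matrix.getD k [] = row := by
        have h1 : matrix[k]? = some row := by
          rw [← List.head?_drop, ← hk]; rfl
        simp [List.getD, h1]
      have hrest : rest = matrix.drop (k + 1) := by
        rw [← List.tail_drop, ← hk]
        rfl
      rw [levBodyRows, ih (k + 1) hrest]
      simp only [List.length_cons, List.range'_succ, List.flatMap_cons, hrow]
      rfl

theorem lev_nm_len (matrix : List (List Int)) (bp : List (List String)) :
    (List.foldl (fun acc i => List.foldl (fun acc j =>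
        if (bp.getD i []).getD j "" ≠ "" then
          acc.set i ((acc.getD i []).set j (LevCell.str
            (PySem.Int.toStr ((matrix.getD i []).getD j 0) ++ " " ++ (bp.getD i []).getD j "")))
        else acc) acc (List.range (matrix.headD []).length))
      (create_matrix (matrix.headD []).length matrix.length) (List.range matrix.length)).length
      = matrix.length := by
  rw [lev_outer_length (fun i j => (bp.getD i []).getD j "" ≠ "")
      (fun i j => LevCell.str (PySem.Int.toStr ((matrix.getD i []).getD j 0) ++ " " ++ (bp.getD i []).getD j ""))]
  simp [create_matrix]

theorem lev_nm (matrix : List (List Int)) (bp : List (List String)) (i : Nat)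
    (hi : i < matrix.length) :
    (List.foldl (fun acc i => List.foldl (fun acc j =>
        if (bp.getD i []).getD j "" ≠ "" then
          acc.set i ((acc.getD i []).set j (LevCell.str
            (PySem.Int.toStr ((matrix.getD i []).getD j 0) ++ " " ++ (bp.getD i []).getD j "")))
        else acc) acc (List.range (matrix.headD []).length))
      (create_matrix (matrix.headD []).length matrix.length) (List.range matrix.length)).getD i []
      = (List.range (matrix.headD []).length).map (fun j =>
          if (bp.getD i []).getD j "" ≠ "" then
            LevCell.str (PySem.Int.toStr ((matrix.getD i []).getD j 0) ++ " " ++ (bp.getD i []).getD j "")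
          else LevCell.int 0) := by
  rw [lev_outer_getD (fun i j => (bp.getD i []).getD j "" ≠ "")
      (fun i j => LevCell.str (PySem.Int.toStr ((matrix.getD i []).getD j 0) ++ " " ++ (bp.getD i []).getD j ""))
      ((matrix.headD []).length) (List.range matrix.length) _ (List.nodup_range)
      (by intro x hx; simpa [create_matrix] using List.mem_range.1 hx) i]
  rw [if_pos (List.mem_range.2 hi)]
  have hacc : (create_matrix (matrix.headD []).length matrix.length).getD i []
      = (List.range (matrix.headD []).length).map (fun _ => LevCell.int 0) := by
    rw [List.getD_eq_getElem _ _ (by simpa [create_matrix] using hi)]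
    simp [create_matrix]
  rw [hacc]
  apply lev_list_eq_range_map
  · rw [lev_rowFold_length]; simp
  · intro j hj
    rw [lev_rowFold_getD _ _ _ _ _ (by intro x hx; simpa using List.mem_range.1 hx) j]
    by_cases hc : (bp.getD i []).getD j "" ≠ ""
    · rw [if_pos ⟨List.mem_range.2 hj, hc⟩, if_pos hc]
    · rw [if_neg (fun h => hc h.2), if_neg hc]
      rw [List.getD_eq_getElem _ _ (by simpa using hj)]
      simp

theorem lev_flatMap_succ (f : Nat → List String) (l : List Nat) :
    List.flatMap f (l.map Nat.succ) = l.flatMap (fun i => f (i + 1)) := by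
  rw [List.flatMap_map]

-- the combined-and-rendered table, abstracted over the cell renderer
def levCellA (matrix : List (List Int)) (bp : List (List String)) (i j : Nat) : String :=
  if (bp.getD i []).getD j "" ≠ "" then
    "<td>" ++ PySem.Int.toStr ((matrix.getD i []).getD j 0) ++ " " ++ (bp.getD i []).getD j "" ++ "</td>"
  else "<td>0</td>"

def levCellB (matrix : List (List Int)) (bp : List (List String)) (i j : Nat) : String :=
  if (bp.getD i []).getD j "" ≠ "" then
    "<td>" ++ PySem.Int.toStr ((matrix.getD i []).getD j 0) ++ " " ++ (bp.getD i []).getD j "" ++ "</td>"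
  else "<td>" ++ PySem.Int.toStr ((matrix.getD i []).getD j 0) ++ "</td>"

def levLines (matrix : List (List Int)) (wr wh : List String) (cell : Nat → Nat → String) : List String :=
  ("<table class=\"levenshtein\"" :: "<tr>" :: (("" :: "" :: wr).map (fun w => "<td>" ++ w ++ "</td>") ++ ["</tr>"]))
  ++ (List.range matrix.length).flatMap (fun i =>
       "<tr>" :: ("<td>" ++ (if 1 ≤ i then wh.getD (i - 1) "" else "") ++ "</td>")
         :: ((List.range (matrix.headD []).length).map (cell i) ++ ["</tr>"]))
  ++ ["</table>"]

theorem lev_abody (matrix : List (List Int)) (bp : List (List String))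
    (wr : List String) (wh : List String) :
    List.flatMap (fun i =>
      "<tr>" :: (List.map (fun cell => "<td>" ++ levRender cell ++ "</td>")
        ((LevCell.str ((["", ""] ++ wh).getD (i + 1) "")) ::
          ((List.map LevCell.str ([""] ++ wr) ::
            List.foldl (fun acc i => List.foldl (fun acc j =>
                if (bp.getD i []).getD j "" ≠ "" then
                  acc.set i ((acc.getD i []).set j (LevCell.str
                    (PySem.Int.toStr ((matrix.getD i []).getD j 0) ++ " " ++ (bp.getD i []).getD j "")))
                else acc) acc (List.range (matrix.headD []).length))
              (create_matrix (matrix.headD []).length matrix.length)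
              (List.range matrix.length)).getD (i + 1) [])) ++ ["</tr>"]))
      (List.range matrix.length)
    = List.flatMap (fun i =>
        "<tr>" :: ("<td>" ++ (if 1 ≤ i then wh.getD (i - 1) "" else "") ++ "</td>")
          :: ((List.range (matrix.headD []).length).map (levCellA matrix bp i) ++ ["</tr>"]))
        (List.range matrix.length) := by
  apply List.flatMap_congr
  intro i hi
  rw [lev_hyp_getD]
  simp only [List.getD_cons_succ, List.map_cons, List.cons_append]
  rw [lev_nm matrix bp i (List.mem_range.1 hi), List.map_map]
  refine congrArg (List.cons "<tr>") (congrArg₂ List.cons ?_ (congrArg (fun l => l ++ ["</tr>"]) ?_))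
  · simp [levRender]
  · apply List.map_congr_left
    intro j _
    unfold levCellA
    by_cases hc : (bp.getD i []).getD j "" ≠ ""
    · simp only [Function.comp_apply, if_pos hc, levRender]
      simp [String.append_assoc]
    · simp only [Function.comp_apply, if_neg hc, levRender]
      decide

theorem lev_A_shape (matrix : List (List Int)) (backpointer_matrix : List (List String))
    (words_ref : List String) (words_hyp : List String) :
    generate_levenshtein_html matrix backpointer_matrix words_ref words_hyp
      = PySem.Str.join "\n" (levLines matrix words_ref words_hyp (levCellA matrix backpointer_matrix)) := by
  unfold generate_levenshtein_html
  simp only []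
  rw [lev_lines_flat]
  congr 1
  rw [List.length_cons, lev_nm_len, List.range_succ_eq_map, List.map_cons, List.flatMap_cons,
      List.flatMap_map, lev_flatMap_succ]
  rw [lev_abody matrix backpointer_matrix words_ref words_hyp]
  unfold levLines
  simp only [List.getD_cons_zero]
  simp [levRender, List.map_map, Function.comp_def, List.append_assoc]

theorem lev_B_shape (matrix : List (List Int)) (backpointer_matrix : List (List String))
    (words_ref : List String) (words_hyp : List String) :
    generate_levenshtein_html_alt matrix backpointer_matrix words_ref words_hyp
      = PySem.Str.join "\n" (levLines matrix words_ref words_hyp (levCellB matrix backpointer_matrix)) := by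
  unfold generate_levenshtein_html_alt
  simp only []
  rw [lev_body_eq backpointer_matrix words_hyp ((matrix.headD []).length) matrix matrix 0 (by simp),
      ← List.range_eq_range']
  unfold levLines levCellB
  simp [List.append_assoc]

-- ¬D_ (with Pre_'s width bounds) gives the pointwise fact the cell comparison needs
theorem lev_h0 (matrix : List (List Int)) (bp : List (List String))
    (wr : List String) (wh : List String)
    (hD : ¬ D_generate_levenshtein_html matrix bp wr wh)
    (hPre : Pre_generate_levenshtein_html matrix bp wr wh) :
    ∀ i < matrix.length, ∀ j < (matrix.headD []).length,
      (bp.getD i []).getD j "" = "" → (matrix.getD i []).getD j 0 = 0 := by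
  intro i hi j hj hbpe
  by_contra hm
  apply hD
  unfold D_generate_levenshtein_html
  obtain ⟨hbl, hbw, hmw⟩ := hPre.2.2 (by omega)
  have hib : i < bp.length := by omega
  rw [List.getD_eq_getElem _ _ hi] at hm
  rw [List.getD_eq_getElem _ _ hib] at hbpe
  rw [List.any_eq_true]
  have hiz : i < (matrix.zip bp).length := by rw [List.length_zip]; omega
  refine ⟨(matrix.zip bp)[i], List.getElem_mem _, ?_⟩
  rw [List.getElem_zip, List.any_eq_true]
  have h1 := hmw i hi
  have h2 := hbw i hi
  rw [List.getD_eq_getElem _ _ hi] at h1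
  rw [List.getD_eq_getElem _ _ hib] at h2
  have hjm : j < matrix[i].length := by omega
  have hjb : j < bp[i].length := by omega
  have hjz : j < ((matrix[i].zip bp[i]).take (matrix.headD []).length).length := by
    rw [List.length_take, List.length_zip]; omega
  refine ⟨_, List.getElem_mem hjz, ?_⟩
  rw [List.getElem_take, List.getElem_zip]
  rw [List.getD_eq_getElem _ _ hjm] at hm
  rw [List.getD_eq_getElem _ _ hjb] at hbpe
  simp [hbpe, hm]

theorem lev_main (matrix : List (List Int)) (backpointer_matrix : List (List String))
    (words_ref : List String) (words_hyp : List String)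
    (hD : ¬ D_generate_levenshtein_html matrix backpointer_matrix words_ref words_hyp)
    (hPre : Pre_generate_levenshtein_html matrix backpointer_matrix words_ref words_hyp) :
    generate_levenshtein_html matrix backpointer_matrix words_ref words_hyp
      = generate_levenshtein_html_alt matrix backpointer_matrix words_ref words_hyp := by
  have h0 := lev_h0 matrix backpointer_matrix words_ref words_hyp hD hPre
  rw [lev_A_shape, lev_B_shape]
  congr 1
  unfold levLines
  congr 1
  congr 1
  apply List.flatMap_congr
  intro i hi
  refine congrArg _ (congrArg _ (congrArg (fun l => l ++ ["</tr>"]) ?_))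
  apply List.map_congr_left
  intro j hj
  unfold levCellA levCellB
  by_cases hc : (backpointer_matrix.getD i []).getD j "" ≠ ""
  · rw [if_pos hc, if_pos hc]
  · rw [if_neg hc, if_neg hc]
    have hm : (matrix.getD i []).getD j 0 = 0 :=
      h0 i (List.mem_range.1 hi) j (List.mem_range.1 hj) (not_ne_iff.1 hc)
    rw [hm]
    decide

-- ===== the tight part: A ≠ B everywhere inside D_ =====

-- str(m) for m ≠ 0 never begins with '0'
theorem lev_toDigitsCore_head (fuel : Nat) : ∀ (n : Nat) (ds : List Char), 0 < n → n < 10 ^ fuel →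
    ∃ c cs, Nat.toDigitsCore 10 fuel n ds = c :: cs ∧ c ≠ '0' := by
  induction fuel with
  | zero => intro n ds h1 h2; simp at h2; omega
  | succ f ih =>
      intro n ds h1 h2
      by_cases h : n / 10 = 0
      · have h10 : n < 10 := by omega
        have hn : n % 10 = n := Nat.mod_eq_of_lt h10
        refine ⟨(n % 10).digitChar, ds, by simp [Nat.toDigitsCore, h], ?_⟩
        rw [hn]
        interval_cases n <;> decide
      · obtain ⟨c, cs, hcs, hc⟩ := ih (n / 10) ((n % 10).digitChar :: ds)
          (Nat.pos_of_ne_zero h)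
          (by
            have hp : (10:Nat) ^ (f + 1) = 10 ^ f * 10 := pow_succ 10 f
            omega)
        exact ⟨c, cs, by simp [Nat.toDigitsCore, h, hcs], hc⟩

theorem lev_toChars_head (m : Int) (hm : m ≠ 0) :
    ∃ c cs, PySem.Int.toChars m = c :: cs ∧ c ≠ '0' := by
  unfold PySem.Int.toChars
  by_cases hneg : m < 0
  · rw [if_pos hneg]; exact ⟨'-', _, rfl, by decide⟩
  · rw [if_neg hneg]
    have hpos : 0 < m.toNat := by omega
    unfold Nat.toDigits
    exact lev_toDigitsCore_head (m.toNat + 1) m.toNat [] hpos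
      (lt_trans (Nat.lt_pow_self (by norm_num)) (Nat.pow_lt_pow_succ (by norm_num)))

-- two lines that stay different under ANY continuations
def levClash (a b : List Char) : Prop := ∀ tA tB : List Char, a ++ tA ≠ b ++ tB

theorem lev_clash_cell (m : Int) (hm : m ≠ 0) :
    levClash ("<td>0</td>".toList) (("<td>" ++ PySem.Int.toStr m ++ "</td>").toList) := by
  obtain ⟨c, cs, hcs, hc⟩ := lev_toChars_head m hm
  intro tA tB h
  rw [String.toList_append, String.toList_append, PySem.Int.toList_toStr, hcs] at h
  rw [show ("<td>0</td>" : String).toList = ['<','t','d','>','0','<','/','t','d','>'] from rfl,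
      show ("<td>" : String).toList = ['<','t','d','>'] from rfl,
      show ("</td>" : String).toList = ['<','/','t','d','>'] from rfl] at h
  simp only [List.cons_append, List.nil_append, List.append_assoc, List.cons.injEq,
    true_and] at h
  exact hc h.1.symm

-- Forall₂ plumbing for the pairwise (equal-or-clash) relation
theorem lev_f2_append {α β : Type} {R : α → β → Prop} {l₁ m₁ : List α} {l₂ m₂ : List β}
    (h1 : List.Forall₂ R l₁ l₂) (h2 : List.Forall₂ R m₁ m₂) :
    List.Forall₂ R (l₁ ++ m₁) (l₂ ++ m₂) := by
  induction h1 with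
  | nil => simpa using h2
  | cons hab _ ih => exact List.Forall₂.cons hab ih

theorem lev_f2_map {α β γ : Type} {R : β → γ → Prop} (f : α → β) (g : α → γ) (l : List α)
    (h : ∀ x ∈ l, R (f x) (g x)) : List.Forall₂ R (l.map f) (l.map g) := by
  induction l with
  | nil => exact List.Forall₂.nil
  | cons a l ih =>
      exact List.Forall₂.cons (h a (by simp))
        (ih (fun x hx => h x (List.mem_cons_of_mem a hx)))

theorem lev_f2_flatMap {α β γ : Type} {R : β → γ → Prop} (f : α → List β) (g : α → List γ)
    (l : List α) (h : ∀ x ∈ l, List.Forall₂ R (f x) (g x)) :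
    List.Forall₂ R (l.flatMap f) (l.flatMap g) := by
  induction l with
  | nil => exact List.Forall₂.nil
  | cons a l ih =>
      simp only [List.flatMap_cons]
      exact lev_f2_append (h a (by simp))
        (ih (fun x hx => h x (List.mem_cons_of_mem a hx)))

theorem lev_f2_lines (matrix : List (List Int)) (bp : List (List String))
    (wr wh : List String) :
    List.Forall₂ (fun a b => a = b ∨ levClash a.toList b.toList)
      (levLines matrix wr wh (levCellA matrix bp))
      (levLines matrix wr wh (levCellB matrix bp)) := by
  unfold levLines
  refine lev_f2_append (lev_f2_append (List.forall₂_same.2 (fun x _ => Or.inl rfl)) ?_)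
    (List.forall₂_same.2 (fun x _ => Or.inl rfl))
  apply lev_f2_flatMap
  intro i _
  refine List.Forall₂.cons (Or.inl rfl) (List.Forall₂.cons (Or.inl rfl)
    (lev_f2_append ?_ (List.forall₂_same.2 (fun x _ => Or.inl rfl))))
  apply lev_f2_map
  intro j _
  unfold levCellA levCellB
  by_cases hbp : (bp.getD i []).getD j "" ≠ ""
  · rw [if_pos hbp, if_pos hbp]; exact Or.inl rfl
  · rw [if_neg hbp, if_neg hbp]
    by_cases hm : (matrix.getD i []).getD j 0 = 0
    · left; rw [hm]; decide
    · right; exact lev_clash_cell _ hm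

-- on clash-or-equal line lists, join is injective
theorem lev_join_inj : ∀ (LA LB : List String),
    List.Forall₂ (fun a b => a = b ∨ levClash a.toList b.toList) LA LB →
    PySem.Str.join "\n" LA = PySem.Str.join "\n" LB → LA = LB := by
  intro LA LB h
  induction h with
  | nil => intro _; rfl
  | @cons a b as bs hab htail ih =>
      intro hj
      have hchars := congrArg String.toList hj
      rw [PySem.Str.toList_join, PySem.Str.toList_join] at hchars
      simp only [List.map_cons] at hchars
      cases as with
      | nil =>
          cases bs with
          | nil =>
              rw [List.map_nil, PySem.Chars.join_singleton, PySem.Chars.join_singleton] at hchars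
              cases hab with
              | inl he => rw [he]
              | inr hcl => exact absurd (by simpa using hchars) (hcl [] [])
          | cons b' bs' => exact absurd htail.length_eq (by simp)
      | cons a' as' =>
          cases bs with
          | nil => exact absurd htail.length_eq (by simp)
          | cons b' bs' =>
              rw [List.map_cons, List.map_cons,
                  PySem.Chars.join_cons_cons, PySem.Chars.join_cons_cons] at hchars
              cases hab with
              | inl he =>
                  subst he
                  rw [List.append_assoc, List.append_assoc] at hchars
                  have h1 := List.append_cancel_left hchars
                  have h2 := List.append_cancel_left h1
                  have h3 : PySem.Str.join "\n" (a' :: as') = PySem.Str.join "\n" (b' :: bs') := by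
                    apply String.ext
                    rw [PySem.Str.toList_join, PySem.Str.toList_join]
                    simpa using h2
                  rw [ih h3]
              | inr hcl =>
                  rw [List.append_assoc, List.append_assoc] at hchars
                  exact absurd hchars (hcl _ _)

-- equal flatMaps of length-matched blocks have equal blocks
theorem lev_flatMap_eq {α : Type} (f g : α → List String) :
    ∀ l : List α, (∀ x ∈ l, (f x).length = (g x).length) →
    l.flatMap f = l.flatMap g → ∀ x ∈ l, f x = g x := by
  intro l
  induction l with
  | nil => intro _ _ x hx; simp at hx
  | cons a l ih =>
      intro hlen heq x hx
      simp only [List.flatMap_cons] at heq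
      obtain ⟨h1, h2⟩ := List.append_inj heq (hlen a (by simp))
      rcases List.mem_cons.1 hx with h | h
      · rw [h]; exact h1
      · exact ih (fun y hy => hlen y (List.mem_cons_of_mem a hy)) h2 x h

-- inside D_ there is a concrete cell with empty backpointer and nonzero value
theorem lev_D_elim (matrix : List (List Int)) (bp : List (List String))
    (wr wh : List String)
    (hD : D_generate_levenshtein_html matrix bp wr wh) :
    ∃ i, i < matrix.length ∧ ∃ j, j < (matrix.headD []).length ∧
      (bp.getD i []).getD j "" = "" ∧ (matrix.getD i []).getD j 0 ≠ 0 := by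
  unfold D_generate_levenshtein_html at hD
  rw [List.any_eq_true] at hD
  obtain ⟨rp, hmem, hin⟩ := hD
  obtain ⟨i, hiz, hrp⟩ := List.getElem_of_mem hmem
  rw [List.length_zip] at hiz
  have him : i < matrix.length := by omega
  have hib : i < bp.length := by omega
  rw [List.getElem_zip] at hrp
  rw [List.any_eq_true] at hin
  obtain ⟨cell, hcmem, hcb⟩ := hin
  rw [← hrp] at hcmem
  dsimp only at hcmem
  obtain ⟨j, hjz, hcell⟩ := List.getElem_of_mem hcmem
  have hjt := hjz
  rw [List.length_take, List.length_zip] at hjt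
  have hjw : j < (matrix.headD []).length := by omega
  have hjm : j < matrix[i].length := by omega
  have hjb : j < bp[i].length := by omega
  rw [List.getElem_take, List.getElem_zip] at hcell
  rw [← hcell] at hcb
  simp at hcb
  refine ⟨i, him, j, hjw, ?_, ?_⟩
  · rw [List.getD_eq_getElem _ _ hib, List.getD_eq_getElem _ _ hjb]
    exact hcb.1
  · rw [List.getD_eq_getElem _ _ him, List.getD_eq_getElem _ _ hjm]
    exact hcb.2

theorem lev_tight_main (matrix : List (List Int)) (backpointer_matrix : List (List String))
    (words_ref : List String) (words_hyp : List String)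
    (hD : D_generate_levenshtein_html matrix backpointer_matrix words_ref words_hyp) :
    generate_levenshtein_html matrix backpointer_matrix words_ref words_hyp
      ≠ generate_levenshtein_html_alt matrix backpointer_matrix words_ref words_hyp := by
  obtain ⟨i, hi, j, hj, hbp, hm⟩ := lev_D_elim matrix backpointer_matrix words_ref words_hyp hD
  rw [lev_A_shape, lev_B_shape]
  intro h
  have hlines := lev_join_inj _ _ (lev_f2_lines matrix backpointer_matrix words_ref words_hyp) h
  unfold levLines at hlines
  have ht1 := congrArg List.tail hlines
  simp only [List.tail_cons] at ht1
  have ht2 := congrArg List.tail ht1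
  simp only [List.tail_cons] at ht2
  have h2 := List.append_cancel_left (List.append_cancel_right ht2)
  have h3 := lev_flatMap_eq _ _ (List.range matrix.length)
    (by intro x _; simp) h2 i (List.mem_range.2 hi)
  simp only [List.cons.injEq, true_and] at h3
  have h4 := List.append_cancel_right h3
  have h5 : levCellA matrix backpointer_matrix i j = levCellB matrix backpointer_matrix i j := by
    have := congrArg (fun l => l[j]?) h4
    simp only [List.getElem?_map] at this
    rw [List.getElem?_range hj] at this
    simpa using this
  unfold levCellA levCellB at h5
  rw [if_neg (by simp only [ne_eq, not_not]; exact hbp), if_neg (by simp only [ne_eq, not_not]; exact hbp)] at h5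
  exact lev_clash_cell _ hm [] [] (by simpa using congrArg String.toList h5)

-- ===== VERDICT (by name: the statements are the Claim_ definitions above) =====
theorem generate_levenshtein_html_spec : Claim_unchanged_generate_levenshtein_html := by
  unfold Claim_unchanged_generate_levenshtein_html
  intro matrix backpointer_matrix words_ref words_hyp _ hPre
  unfold Spec_generate_levenshtein_html
  intro hD
  exact lev_main matrix backpointer_matrix words_ref words_hyp hD hPre

theorem generate_levenshtein_html_changed : Claim_changed_generate_levenshtein_html := by
  unfold Claim_changed_generate_levenshtein_html; decide

theorem generate_levenshtein_html_tight : Claim_exact_generate_levenshtein_html := by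
  unfold Claim_exact_generate_levenshtein_html
  intro matrix backpointer_matrix words_ref words_hyp _ _ hD
  exact lev_tight_main matrix backpointer_matrix words_ref words_hyp hD
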